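-- pv_equiv track=rewrite | github.com/prog1cbas-star/uk-1c-skills | build/uk1c/agents.py | _strip_unsupported_frontmatter
-- ===== SOURCE A (Python) =====
-- UNSUPPORTED_FRONTMATTER_KEYS = {"allowed-tools", "allowed_tools"}
--
-- def _strip_unsupported_frontmatter(text: str) -> str:
--     lines = text.splitlines(keepends=True)
--     if not lines or lines[0].strip() != "---":
--         return text
--     end = None
--     for i in range(1, len(lines)):
--         if lines[i].strip() == "---":
--             end = i
--             break
--     if end is None:
--         return text
--
--     header = lines[1:end]
--     filtered: list[str] = []
--     skipping = False
--     for line in header: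
--         stripped = line.strip()
--         is_top_key = bool(stripped) and not line.startswith((" ", "\t")) and ":" in line
--         if is_top_key:
--             key = stripped.split(":", 1)[0].strip()
--             skipping = key in UNSUPPORTED_FRONTMATTER_KEYS
--         if not skipping:
--             filtered.append(line)
--     return "---\n" + "".join(filtered) + "---\n" + "".join(lines[end + 1 :])
-- ===== SOURCE B (Python) =====
-- UNSUPPORTED_FRONTMATTER_KEYS = {"allowed-tools", "allowed_tools"}
--
--
-- def _is_top_key(line):
--     return bool(line.strip()) and not line.startswith((" ", "\t")) and ":" in line
--
--
-- def _split_block(rest):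
--     # rest[:j], rest[j:] where j is the first index of a top-level key line
--     j = 0
--     while j < len(rest) and not _is_top_key(rest[j]):
--         j += 1
--     return rest[:j], rest[j:]
--
--
-- def _filter_header(header):
--     # recursion on blocks: a keyless prefix is kept line by line; a top-key line
--     # absorbs its continuation/blank lines as a block, dropped iff the key is unsupported
--     if not header:
--         return []
--     line, rest = header[0], header[1:]
--     if not _is_top_key(line):
--         return [line] + _filter_header(rest)
--     body, rest2 = _split_block(rest)
--     key = line.strip().split(":", 1)[0].strip()
--     block = [] if key in UNSUPPORTED_FRONTMATTER_KEYS else [line] + body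
--     return block + _filter_header(rest2)
--
--
-- def _strip_unsupported_frontmatter(text: str) -> str:
--     lines = text.splitlines(keepends=True)
--     if not lines or lines[0].strip() != "---":
--         return text
--     end = None
--     for i in range(1, len(lines)):
--         if lines[i].strip() == "---":
--             end = i
--             break
--     if end is None:
--         return text
--     return "---\n" + "".join(_filter_header(lines[1:end])) + "---\n" + "".join(lines[end + 1:])
-- ===== Notes on version B (the rewrite author's own statement) =====
-- stated objective: alternative
-- what changed: A filters the header lines with a single stateful scan carrying a mutable boolean skip flag; B instead recursively partitions the header into blocks (a keyless prefix, then one block per top-level key line with its continuation/blank lines) and drops whole blocks whose key is unsupported.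
import Mathlib
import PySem

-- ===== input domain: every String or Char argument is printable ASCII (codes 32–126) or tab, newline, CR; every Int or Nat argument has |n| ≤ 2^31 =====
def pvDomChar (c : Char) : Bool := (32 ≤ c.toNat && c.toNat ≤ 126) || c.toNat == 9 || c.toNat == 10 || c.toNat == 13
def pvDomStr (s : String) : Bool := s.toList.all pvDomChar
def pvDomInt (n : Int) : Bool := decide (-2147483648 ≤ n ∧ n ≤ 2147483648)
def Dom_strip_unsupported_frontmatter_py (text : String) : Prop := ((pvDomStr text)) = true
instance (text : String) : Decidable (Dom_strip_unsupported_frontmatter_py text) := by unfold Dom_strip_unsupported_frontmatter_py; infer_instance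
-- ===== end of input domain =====

-- B re-groups the frontmatter header into key blocks by recursion instead of A's stateful
-- skipping-flag scan (objective: alternative decomposition, same cost); same return value.

-- shared module context: str.splitlines(keepends=True), hand-ported (exact on the Dom
-- alphabet, whose only line terminators are '\n', '\r', '\r\n'), and the module constant
-- UNSUPPORTED_FRONTMATTER_KEYS as a membership test.
def pvSplitKeepAux : List Char → List Char → List (List Char)
  | acc, [] => if acc = [] then [] else [acc.reverse]
  | acc, '\r' :: '\n' :: rest => (acc.reverse ++ ['\r', '\n']) :: pvSplitKeepAux [] rest
  | acc, '\n' :: rest => (acc.reverse ++ ['\n']) :: pvSplitKeepAux [] rest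
  | acc, '\r' :: rest => (acc.reverse ++ ['\r']) :: pvSplitKeepAux [] rest
  | acc, c :: rest => pvSplitKeepAux (c :: acc) rest

def pvSplitKeep (s : List Char) : List (List Char) := pvSplitKeepAux [] s

def pvUnsupportedKey (k : List Char) : Bool :=
  k == "allowed-tools".toList || k == "allowed_tools".toList

-- ===== PORT A =====
-- for i in range(1, len(lines)): if lines[i].strip() == "---": end = i; break
def pvFindFenceA : List (List Char) → Nat → Option Nat
  | [], _ => none
  | l :: rest, i =>
    if PySem.Chars.strip l = "---".toList then some i else pvFindFenceA rest (i + 1)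

-- A's filtering loop over header with the mutable `skipping` flag
def pvFilterA : List (List Char) → Bool → List (List Char)
  | [], _ => []
  | line :: rest, skipping =>
    let stripped := PySem.Chars.strip line
    let isTop := !stripped.isEmpty && !(line.head? == some ' ' || line.head? == some '\t')
                   && line.contains ':'
    let skipping' :=
      if isTop then pvUnsupportedKey (PySem.Chars.strip (stripped.takeWhile (· ≠ ':')))
      else skipping
    if skipping' then pvFilterA rest skipping' else line :: pvFilterA rest skipping'

def strip_unsupported_frontmatter_py (text : String) : String :=
  let lines := pvSplitKeep text.toList
  match lines with
  | [] => text
  | first :: _ =>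
    if PySem.Chars.strip first ≠ "---".toList then text
    else
      match pvFindFenceA (lines.drop 1) 1 with
      | none => text
      | some e =>
        let header := (lines.drop 1).take (e - 1)
        String.ofList ("---\n".toList ++ (pvFilterA header false).flatten
                    ++ "---\n".toList ++ ((lines.drop (e + 1)).flatten))

-- ===== PORT B =====
-- _is_top_key
def pvIsTopKeyB (line : List Char) : Bool :=
  !(PySem.Chars.strip line).isEmpty && !(line.head? == some ' ' || line.head? == some '\t')
    && line.contains ':'

-- _split_block: (rest[:j], rest[j:]) at the first top-key index j
def pvSplitBlockB (rest : List (List Char)) : List (List Char) × List (List Char) :=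
  (rest.takeWhile (fun l => !pvIsTopKeyB l), rest.dropWhile (fun l => !pvIsTopKeyB l))

-- line.strip().split(":", 1)[0].strip()
def pvKeyOfB (line : List Char) : List Char :=
  PySem.Chars.strip ((PySem.Chars.strip line).takeWhile (· ≠ ':'))

-- _filter_header: recursion on blocks
def pvFilterB : List (List Char) → List (List Char)
  | [] => []
  | line :: rest =>
    if pvIsTopKeyB line then
      (if pvUnsupportedKey (pvKeyOfB line) then []
       else line :: (pvSplitBlockB rest).1) ++ pvFilterB (pvSplitBlockB rest).2
    else line :: pvFilterB rest
termination_by l => l.length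
decreasing_by
  · simpa [pvSplitBlockB] using
      Nat.lt_succ_of_le (rest.dropWhile_sublist (p := fun l => !pvIsTopKeyB l)).length_le
  · simp

def strip_unsupported_frontmatter_py_alt (text : String) : String :=
  let lines := pvSplitKeep text.toList
  match lines with
  | [] => text
  | first :: _ =>
    if PySem.Chars.strip first ≠ "---".toList then text
    else
      match pvFindFenceA (lines.drop 1) 1 with
      | none => text
      | some e =>
        let header := (lines.drop 1).take (e - 1)
        String.ofList ("---\n".toList ++ (pvFilterB header).flatten
                    ++ "---\n".toList ++ ((lines.drop (e + 1)).flatten))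

-- ===== PRECONDITION & SPEC =====
def Spec_strip_unsupported_frontmatter_py (text : String) (out : String) : Prop := out = strip_unsupported_frontmatter_py_alt text
instance (text : String) (out : String) : Decidable (Spec_strip_unsupported_frontmatter_py text out) := by unfold Spec_strip_unsupported_frontmatter_py; infer_instance

-- ===== CLAIM (what is proved, stated in full; the proofs are below) =====
def Claim_equal_strip_unsupported_frontmatter_py : Prop := ∀ (text : String), Dom_strip_unsupported_frontmatter_py text → Spec_strip_unsupported_frontmatter_py text (strip_unsupported_frontmatter_py text)

-- ===== LEMMAS AND PROOFS =====

-- A's filter, run on a list whose head (after dropWhile) is a top-key line, ignores the flag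
theorem pvFilterA_dropWhile_irrel (l : List (List Char)) (s s' : Bool) :
    pvFilterA (l.dropWhile (fun x => !pvIsTopKeyB x)) s
      = pvFilterA (l.dropWhile (fun x => !pvIsTopKeyB x)) s' := by
  induction l with
  | nil => simp [List.dropWhile, pvFilterA]
  | cons c t ih =>
    by_cases h : pvIsTopKeyB c
    · simp only [List.dropWhile, h, Bool.not_true]
      simp only [pvFilterA, pvIsTopKeyB] at h ⊢
      simp only [h, if_true]
    · simpa [List.dropWhile, h] using ih

-- A's filter splits at the first top-key line
theorem pvFilterA_span (l : List (List Char)) (s : Bool) :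
    pvFilterA l s = (if s then [] else l.takeWhile (fun x => !pvIsTopKeyB x))
      ++ pvFilterA (l.dropWhile (fun x => !pvIsTopKeyB x)) s := by
  induction l generalizing s with
  | nil => cases s <;> simp [pvFilterA, List.takeWhile, List.dropWhile]
  | cons c t ih =>
    by_cases h : pvIsTopKeyB c
    · simp [List.takeWhile, List.dropWhile, h]
    · have h' : (!(PySem.Chars.strip c).isEmpty
          && !(c.head? == some ' ' || c.head? == some '\t') && c.contains ':') = false := by
        simpa [pvIsTopKeyB] using h
      simp only [List.takeWhile, List.dropWhile, h, Bool.not_false, pvFilterA, h']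
      cases s
      · simp [ih false]
      · simp [ih true]

theorem pvFilter_eq : ∀ (n : Nat) (l : List (List Char)), l.length ≤ n →
    pvFilterA l false = pvFilterB l := by
  intro n
  induction n with
  | zero =>
    intro l hl
    have : l = [] := List.eq_nil_of_length_eq_zero (Nat.le_zero.mp hl)
    simp [this, pvFilterA, pvFilterB]
  | succ n ih =>
    intro l hl
    match l with
    | [] => simp [pvFilterA, pvFilterB]
    | line :: rest =>
      by_cases h : pvIsTopKeyB line
      · have h' : (!(PySem.Chars.strip line).isEmpty
            && !(line.head? == some ' ' || line.head? == some '\t') && line.contains ':')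
              = true := by simpa [pvIsTopKeyB] using h
        have hrest : rest.length ≤ n := by simpa using hl
        have hdrop : (rest.dropWhile (fun x => !pvIsTopKeyB x)).length ≤ n :=
          le_trans (rest.dropWhile_sublist (p := fun x => !pvIsTopKeyB x)).length_le hrest
        simp only [pvFilterB, h, if_true, pvSplitBlockB]
        simp only [pvFilterA, h', if_true]
        by_cases hu : pvUnsupportedKey (pvKeyOfB line)
        · have hu' : pvUnsupportedKey
              (PySem.Chars.strip ((PySem.Chars.strip line).takeWhile (· ≠ ':'))) = true := by
            simpa [pvKeyOfB] using hu
          rw [hu']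
          simp only [if_true, hu, List.nil_append]
          rw [pvFilterA_span rest true]
          simp only [if_true, List.nil_append]
          rw [pvFilterA_dropWhile_irrel rest true false]
          exact ih _ hdrop
        · have hu' : pvUnsupportedKey
              (PySem.Chars.strip ((PySem.Chars.strip line).takeWhile (· ≠ ':'))) = false := by
            simpa [pvKeyOfB] using hu
          rw [hu']
          simp only [if_false, Bool.false_eq_true, hu]
          rw [pvFilterA_span rest false]
          simp only [if_false, Bool.false_eq_true]
          rw [ih _ hdrop]
          simp
      · have h' : (!(PySem.Chars.strip line).isEmpty
            && !(line.head? == some ' ' || line.head? == some '\t') && line.contains ':')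
              = false := by simpa [pvIsTopKeyB] using h
        have hrest : rest.length ≤ n := by simpa using hl
        simp only [pvFilterA, h', Bool.false_eq_true, if_false, pvFilterB, h]
        rw [ih _ hrest]

theorem pvFilter_eq' (l : List (List Char)) : pvFilterA l false = pvFilterB l :=
  pvFilter_eq l.length l le_rfl

-- ===== VERDICT (by name: the statement is the Claim_ definition above) =====
theorem strip_unsupported_frontmatter_py_spec : Claim_equal_strip_unsupported_frontmatter_py := by
  intro text _
  unfold Spec_strip_unsupported_frontmatter_py
  unfold strip_unsupported_frontmatter_py strip_unsupported_frontmatter_py_alt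
  cases hls : pvSplitKeep text.toList with
  | nil => rfl
  | cons first tl =>
    simp only
    split_ifs with h1
    · rfl
    · cases hf : pvFindFenceA ((first :: tl).drop 1) 1 with
      | none => rfl
      | some e => simp only [pvFilter_eq']
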